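-- pv_equiv track=rewrite | github.com/Quentin15/pythonSudoku | view.py | affichage_ligne
-- ===== SOURCE A (Python) =====
-- def affichage_ligne(ligne,p): # Ajoute les lignes remplies
--     liste = []
--     cpt = 0
--     while cpt < p**2: #p² = longueur de la ligne
--         if cpt % p == 0:
--             # Ajoute un | pour chaque indice multiple de p
--             liste.append("|")
--         liste.append(str(ligne[cpt]))
--         cpt+=1
--     liste.append("|") # Ajoute le dernier | de chaque ligne
--     return liste
-- ===== SOURCE B (Python) =====
-- def affichage_ligne(ligne, p):
--     n = abs(p)
--     liste = []
--     for i in range(n):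
--         liste.append("|")
--         liste.extend(str(x) for x in ligne[i * n:(i + 1) * n])
--     liste.append("|")
--     return liste
-- ===== Notes on version B (the rewrite author's own statement) =====
-- stated objective: alternative
-- what changed: Replaces A's single flat while-loop over p**2 indices with a modulo test per element by a nested chunked traversal: one pass over the abs(p) blocks, each block emitted as '|' plus the stringified slice ligne[i*n:(i+1)*n].
-- outside the precondition, e.g. on affichage_ligne([1], 2): A raises IndexError, B returns ['|', '1', '|', '|']
import Mathlib
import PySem

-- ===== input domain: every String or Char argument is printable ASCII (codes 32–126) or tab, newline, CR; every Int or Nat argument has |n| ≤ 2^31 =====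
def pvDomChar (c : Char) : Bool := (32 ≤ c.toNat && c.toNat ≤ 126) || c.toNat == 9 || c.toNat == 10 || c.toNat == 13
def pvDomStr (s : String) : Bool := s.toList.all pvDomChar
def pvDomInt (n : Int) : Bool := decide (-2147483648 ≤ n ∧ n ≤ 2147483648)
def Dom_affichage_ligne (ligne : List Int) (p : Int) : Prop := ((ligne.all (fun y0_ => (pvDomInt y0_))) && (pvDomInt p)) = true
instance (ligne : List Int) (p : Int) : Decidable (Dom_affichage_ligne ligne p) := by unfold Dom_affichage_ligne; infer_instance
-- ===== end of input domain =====

-- B rewrites A's flat modulo-gated while-loop as a nested chunked traversal over the abs(p) blocks (alternative decomposition, same cost).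

-- ===== PORT A =====
-- the while-loop of A: runs for 'fuel' iterations (fuel = p**2 at the start), cpt the loop counter
def pvLoopA (ligne : List Int) (p : Int) (liste : List String) (cpt : Int) : Nat → List String
  | 0 => liste ++ ["|"]
  | fuel + 1 =>
    let liste' := if PySem.Int.mod cpt p = 0 then liste ++ ["|"] else liste
    match PySem.List.pyGet? ligne cpt with
    | none => liste'                      -- IndexError in Python; excluded by Pre_
    | some v => pvLoopA ligne p (liste' ++ [PySem.Int.toStr v]) (cpt + 1) fuel

def affichage_ligne (ligne : List Int) (p : Int) : List String :=
  pvLoopA ligne p [] 0 (p ^ 2).toNat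

-- ===== PORT B =====
def affichage_ligne_alt (ligne : List Int) (p : Int) : List String :=
  let n : Int := |p|
  (PySem.List.pyRange 0 n 1).foldl
    (fun liste i =>
      liste ++ "|" :: (PySem.List.slice ligne (some (i * n)) (some ((i + 1) * n))).map PySem.Int.toStr)
    [] ++ ["|"]

-- ===== PRECONDITION & SPEC =====
-- Pre_ excludes exactly the inputs where A raises IndexError: the row must hold at least p**2 entries.
def Pre_affichage_ligne (ligne : List Int) (p : Int) : Prop := p ^ 2 ≤ (ligne.length : Int)
instance (ligne : List Int) (p : Int) : Decidable (Pre_affichage_ligne ligne p) := by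
  unfold Pre_affichage_ligne; infer_instance

def pvWitness_affichage_ligne : List Int × Int := ([1, 2, 3, 4], 2)

def Spec_affichage_ligne (ligne : List Int) (p : Int) (out : List String) : Prop := out = affichage_ligne_alt ligne p
instance (ligne : List Int) (p : Int) (out : List String) : Decidable (Spec_affichage_ligne ligne p out) := by unfold Spec_affichage_ligne; infer_instance

-- ===== CLAIM (what is proved, stated in full; the proofs are below) =====
def Claim_equal_affichage_ligne : Prop := ∀ (ligne : List Int) (p : Int), Dom_affichage_ligne ligne p → Pre_affichage_ligne ligne p → Spec_affichage_ligne ligne p (affichage_ligne ligne p)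

-- ===== LEMMAS AND PROOFS =====

-- the "|"-prefixed string chunk for block i
def pvChunk (ligne : List Int) (n i : Nat) : List String :=
  "|" :: ((ligne.drop (i * n)).take n).map PySem.Int.toStr

theorem pvLoopA_block (ligne : List Int) (p : Int) (n : Nat) (hn : n = p.natAbs)
    (hlen : n * n ≤ ligne.length) :
    ∀ k, k < n → ∀ (i : Nat) (acc : List String), i < n →
      pvLoopA ligne p acc (((i * n + (n - k) : Nat) : Int)) (n * n - (i * n + (n - k))) =
      pvLoopA ligne p (acc ++ ((ligne.drop (i * n + (n - k))).take k).map PySem.Int.toStr)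
        (((i + 1) * n : Nat) : Int) (n * n - (i + 1) * n) := by
  intro k
  induction k with
  | zero =>
    intro _ i acc hi
    have h1 : i * n + (n - 0) = (i + 1) * n := by rw [Nat.add_mul, Nat.one_mul, Nat.sub_zero]
    rw [h1]
    simp
  | succ k ih =>
    intro hk i acc hi
    have hj1 : 1 ≤ n - (k + 1) := by omega
    have hmul : (i + 1) * n = i * n + n := by rw [Nat.add_mul, Nat.one_mul]
    have hle : (i + 1) * n ≤ n * n := Nat.mul_le_mul_right n (by omega)
    have hcpt : i * n + (n - (k + 1)) < n * n := by omega
    obtain ⟨f, hf⟩ : ∃ f, n * n - (i * n + (n - (k + 1))) = f + 1 := ⟨n * n - (i * n + (n - (k + 1))) - 1, by omega⟩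
    rw [hf]
    -- the modulo test fails: cpt is not a multiple of p
    have hmod : ¬ PySem.Int.mod ((i * n + (n - (k + 1)) : Nat) : Int) p = 0 := by
      rw [PySem.Int.mod_eq_zero_iff_dvd]
      intro hdvd
      have hdn : (n : Int) ∣ ((i * n + (n - (k + 1)) : Nat) : Int) := by
        rw [hn] at *
        exact (Int.natAbs_dvd).mpr hdvd
      have : n ∣ i * n + (n - (k + 1)) := Int.ofNat_dvd.mp (by exact_mod_cast hdn)
      have h2 : n ∣ n - (k + 1) := (Nat.dvd_add_right (dvd_mul_left n i)).mp this
      have := Nat.le_of_dvd (by omega) h2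
      omega
    have hidx : PySem.List.pyGet? ligne ((i * n + (n - (k + 1)) : Nat) : Int) =
        some (ligne[i * n + (n - (k + 1))]'(by omega)) := by
      rw [PySem.List.pyGet?_natCast]
      exact List.getElem?_eq_getElem (by omega)
    simp only [pvLoopA, hmod, hidx]
    have hsucc : ((i * n + (n - (k + 1)) : Nat) : Int) + 1 = ((i * n + (n - k) : Nat) : Int) := by
      push_cast; omega
    have hfk : f = n * n - (i * n + (n - k)) := by omega
    rw [hsucc, hfk, ih (by omega) i _ hi]
    -- identify the accumulated chunks
    have hdrop : (ligne.drop (i * n + (n - (k + 1)))).take (k + 1) =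
        ligne[i * n + (n - (k + 1))]'(by omega) :: (ligne.drop (i * n + (n - k))).take k := by
      have hix : i * n + (n - (k + 1)) + 1 = i * n + (n - k) := by omega
      rw [List.drop_eq_getElem_cons (by omega), List.take_succ_cons, hix]
    rw [hdrop]
    simp

theorem pvLoopA_main (ligne : List Int) (p : Int) (n : Nat) (hn : n = p.natAbs)
    (hlen : n * n ≤ ligne.length) :
    ∀ m, m ≤ n → ∀ acc : List String,
      pvLoopA ligne p acc (((n - m) * n : Nat) : Int) (n * n - (n - m) * n) = acc ++ (((List.range n).drop (n - m)).flatMap (pvChunk ligne n)) ++ ["|"] := by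
  intro m
  induction m with
  | zero =>
    intro _ acc
    have h0 : n - 0 = n := Nat.sub_zero n
    rw [h0, Nat.sub_self]
    rw [show (List.range n).drop n = [] from by simp]
    simp [pvLoopA]
  | succ m ih =>
    intro hm acc
    have hn1 : 1 ≤ n := by omega
    have hi : n - (m + 1) < n := by omega
    have h1 : (n - (m + 1) + 1) * n ≤ n * n := Nat.mul_le_mul_right n (by omega)
    have h2 : (n - (m + 1) + 1) * n = (n - (m + 1)) * n + n := by rw [Nat.add_mul, Nat.one_mul]
    have hmulnn : (n - (m + 1)) * n < n * n := by omega
    obtain ⟨f, hf⟩ : ∃ f, n * n - (n - (m + 1)) * n = f + 1 :=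
      ⟨n * n - (n - (m + 1)) * n - 1, by omega⟩
    rw [hf]
    have hmod : PySem.Int.mod (((n - (m + 1)) * n : Nat) : Int) p = 0 := by
      rw [PySem.Int.mod_eq_zero_iff_dvd]
      have h3 : (n : Int) ∣ (((n - (m + 1)) * n : Nat) : Int) := by
        exact_mod_cast Int.ofNat_dvd.mpr (dvd_mul_left n (n - (m + 1)))
      have h4 : p ∣ (n : Int) := by rw [hn]; exact Int.dvd_natAbs.mpr dvd_rfl
      exact dvd_trans h4 h3
    have hidxlt : (n - (m + 1)) * n < ligne.length := by omega
    have hidx : PySem.List.pyGet? ligne (((n - (m + 1)) * n : Nat) : Int) =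
        some (ligne[(n - (m + 1)) * n]'hidxlt) := by
      rw [PySem.List.pyGet?_natCast]
      exact List.getElem?_eq_getElem hidxlt
    simp only [pvLoopA, hmod, hidx, if_pos]
    have e1 : (n - (m + 1)) * n + (n - (n - 1)) = (n - (m + 1)) * n + 1 := by omega
    have hsucc : ((((n - (m + 1)) * n : Nat)) : Int) + 1 =
        ((((n - (m + 1)) * n + (n - (n - 1))) : Nat) : Int) := by
      rw [e1]; push_cast; ring
    have hfuel : f = n * n - ((n - (m + 1)) * n + (n - (n - 1))) := by omega
    rw [hsucc, hfuel, pvLoopA_block ligne p n hn hlen (n - 1) (by omega) _ _ hi]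
    have e2 : n - (m + 1) + 1 = n - m := by omega
    rw [e2, ih (by omega)]
    have hrangelen : n - (m + 1) < (List.range n).length := by simpa using hi
    have hrange : (List.range n).drop (n - (m + 1)) =
        (n - (m + 1)) :: (List.range n).drop (n - m) := by
      rw [List.drop_eq_getElem_cons hrangelen, List.getElem_range, e2]
    rw [hrange, List.flatMap_cons]
    have hchunk : pvChunk ligne n (n - (m + 1)) =
        "|" :: PySem.Int.toStr (ligne[(n - (m + 1)) * n]'hidxlt) ::
          ((ligne.drop ((n - (m + 1)) * n + 1)).take (n - 1)).map PySem.Int.toStr := by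
      have e4 : ∀ (x : Int) (l : List Int), List.take n (x :: l) = x :: List.take (n - 1) l := by
        intro x l
        obtain ⟨n', rfl⟩ : ∃ n', n = n' + 1 := ⟨n - 1, by omega⟩
        simp
      unfold pvChunk
      rw [List.drop_eq_getElem_cons hidxlt, e4]
      simp only [List.map_cons]
    rw [hchunk, e1]
    simp [List.append_assoc]

theorem alt_eq_flatMap (ligne : List Int) (p : Int) (n : Nat) (hn : n = p.natAbs) :
    affichage_ligne_alt ligne p = (List.range n).flatMap (pvChunk ligne n) ++ ["|"] := by
  have habs : |p| = (n : Int) := by rw [hn, Int.abs_eq_natAbs]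
  simp only [affichage_ligne_alt, habs]
  rw [PySem.List.pyRange_zero_natCast, List.foldl_map, PySem.List.foldl_append_eq_flatMap]
  congr 1
  apply List.flatMap_congr
  intro i _
  have e1 : ((i : Int) * (n : Int)) = ((i * n : Nat) : Int) := by push_cast; ring
  have e2 : ((i : Int) + 1) * (n : Int) = ((i * n : Nat) : Int) + ((n : Nat) : Int) := by
    push_cast; ring
  rw [e1, e2, PySem.List.slice_natCast_add]
  rfl

-- ===== VERDICT (by name: the statement is the Claim_ definition above) =====
theorem affichage_ligne_spec : Claim_equal_affichage_ligne := by
  intro ligne p _ hpre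
  unfold Spec_affichage_ligne
  have hcast : ((p.natAbs * p.natAbs : Nat) : Int) = p ^ 2 := by
    rw [Nat.cast_mul, Int.natAbs_mul_self', sq]
  have hlen : p.natAbs * p.natAbs ≤ ligne.length := by
    have : ((p.natAbs * p.natAbs : Nat) : Int) ≤ (ligne.length : Int) := by
      rw [hcast]; exact hpre
    exact_mod_cast this
  have hmain := pvLoopA_main ligne p p.natAbs rfl hlen p.natAbs le_rfl []
  rw [Nat.sub_self, Nat.zero_mul, Nat.sub_zero, List.drop_zero] at hmain
  have htn : (p ^ 2).toNat = p.natAbs * p.natAbs := by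
    rw [← hcast, Int.toNat_natCast]
  unfold affichage_ligne
  rw [htn, alt_eq_flatMap ligne p p.natAbs rfl]
  simpa using hmain
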